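-- pv_equiv track=rewrite | github.com/diogo1790/inphinity | DatasetCreationFromCouple.py | calculatePPIscoresForCouple
-- ===== SOURCE A (Python) =====
-- def searchPFAMmatch(list_pfamId_orga_A:list, list_pfamId_orga_B:list, dict_ddi_sources:dict):
--     """
--     Combine all the pfam ids and check if they exist in the dictionary of ddi, if yes the tuple was add to an array and returned.
--     This method check the id_pfam_A - id_pfam_B AND id_fam_B - id_pfam_A
--
--     :param list_pfamId_orga_A: list of pfam ids in the organism A
--     :param list_pfamId_orga_B: list of pfam ids in the organism B
--     :param dict_ddi_sources: dictionary that contain all the pairs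
--
--     :type list_pfamId_orga_A: list
--     :type list_pfamId_orga_B: list
--     :type dict_ddi_sources: dictionary
--
--     :return: array with the tuples of id ddi matches
--     :rtype: array[(id_domain_a, id_domain_b)]
--
--     """
--     array_tuples_match = []
--     for id_pfam_orga_a in list_pfamId_orga_A:
--         for id_pfam_orga_b in list_pfamId_orga_B:
--             if (id_pfam_orga_a, id_pfam_orga_b) in dict_ddi_sources:
--                 tuple_key = (id_pfam_orga_a, id_pfam_orga_b)
--                 array_tuples_match.append(tuple_key)
--                 continue
--             elif (id_pfam_orga_b, id_pfam_orga_a) in dict_ddi_sources: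
--                 tuple_key = (id_pfam_orga_b, id_pfam_orga_a)
--                 array_tuples_match.append(tuple_key)
--
--     return array_tuples_match
--
-- def scoreDDICalculation(list_of_ddi_ids_tuples_pair:list, dict_ddi_scores:dict):
--     """
--     Calculate the PPI score based on sum of the DDI scores
--     IF the DDI score comes from iPfam or 3DID I put automaticly 9 which correspond to the maximum of DDI score (combination between all the predictide methods)
--
--     :param list_of_ddi_ids_tuples_pair: list of tuples DDI between two PPI
--     :param dict_ddi_scores: dictionary with all the DDI sources
--
--     :type list_of_ddi_ids_tuples_pair: list of tuples
--     :type dict_ddi_scores: dict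
--
--
--     :return: the PPI score
--     :rtype: int
--
--     """
--     score_ppi = 0
--     score_ppi_aux = 0
--     for tuple_ddi in list_of_ddi_ids_tuples_pair:
--         list_sources = dict_ddi_scores[tuple_ddi]
--         if 1 in list_sources or 2 in list_sources:
--             score_ppi_aux = 9
--         else:
--             score_ppi_aux = len(list_sources)
--
--         score_ppi += score_ppi_aux
--         score_ppi_aux = 0
--     return score_ppi
--
-- def calculatePPIscoresForCouple(dict_proteins_pfam_bact:dict, dict_proteins_pfam_phage:dict, dict_ddi_sources:dict):
--     dict_scores_results = {}
--     for key_bact, value_bact in dict_proteins_pfam_bact.items():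
--         for key_phage, value_phage in dict_proteins_pfam_phage.items():
--             list_tuples_ddi = searchPFAMmatch(value_bact, value_phage, dict_ddi_sources)
--             score_ppi = scoreDDICalculation(list_tuples_ddi, dict_ddi_sources)
--             if score_ppi in dict_scores_results:
--                 dict_scores_results[score_ppi] += 1
--             else:
--                 dict_scores_results[score_ppi] = 1
--
--     return dict_scores_results
-- ===== SOURCE B (Python) =====
-- def calculatePPIscoresForCouple(dict_proteins_pfam_bact: dict, dict_proteins_pfam_phage: dict, dict_ddi_sources: dict):
--     # Fused single pass: for each protein pair, accumulate the PPI score directly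
--     # while scanning the pfam-id cross product (no intermediate tuple list, no
--     # second dict lookup), then bin it into the histogram.
--     dict_scores_results = {}
--     for value_bact in dict_proteins_pfam_bact.values():
--         for value_phage in dict_proteins_pfam_phage.values():
--             score_ppi = 0
--             for id_a in value_bact:
--                 for id_b in value_phage:
--                     sources = dict_ddi_sources.get((id_a, id_b))
--                     if sources is None:
--                         sources = dict_ddi_sources.get((id_b, id_a))
--                     if sources is not None:
--                         score_ppi += 9 if (1 in sources or 2 in sources) else len(sources)
--             dict_scores_results[score_ppi] = dict_scores_results.get(score_ppi, 0) + 1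
--     return dict_scores_results
-- ===== Notes on version B (the rewrite author's own statement) =====
-- stated objective: alternative
-- what changed: B fuses the two helpers into one pass: it accumulates each protein pair's score directly while scanning the pfam-id cross product (dict.get with (a,b)-before-(b,a) precedence), instead of first materialising a list of matched tuples and then re-looking each tuple up in the dict to sum the scores; the histogram is binned with dict.get.
import Mathlib
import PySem

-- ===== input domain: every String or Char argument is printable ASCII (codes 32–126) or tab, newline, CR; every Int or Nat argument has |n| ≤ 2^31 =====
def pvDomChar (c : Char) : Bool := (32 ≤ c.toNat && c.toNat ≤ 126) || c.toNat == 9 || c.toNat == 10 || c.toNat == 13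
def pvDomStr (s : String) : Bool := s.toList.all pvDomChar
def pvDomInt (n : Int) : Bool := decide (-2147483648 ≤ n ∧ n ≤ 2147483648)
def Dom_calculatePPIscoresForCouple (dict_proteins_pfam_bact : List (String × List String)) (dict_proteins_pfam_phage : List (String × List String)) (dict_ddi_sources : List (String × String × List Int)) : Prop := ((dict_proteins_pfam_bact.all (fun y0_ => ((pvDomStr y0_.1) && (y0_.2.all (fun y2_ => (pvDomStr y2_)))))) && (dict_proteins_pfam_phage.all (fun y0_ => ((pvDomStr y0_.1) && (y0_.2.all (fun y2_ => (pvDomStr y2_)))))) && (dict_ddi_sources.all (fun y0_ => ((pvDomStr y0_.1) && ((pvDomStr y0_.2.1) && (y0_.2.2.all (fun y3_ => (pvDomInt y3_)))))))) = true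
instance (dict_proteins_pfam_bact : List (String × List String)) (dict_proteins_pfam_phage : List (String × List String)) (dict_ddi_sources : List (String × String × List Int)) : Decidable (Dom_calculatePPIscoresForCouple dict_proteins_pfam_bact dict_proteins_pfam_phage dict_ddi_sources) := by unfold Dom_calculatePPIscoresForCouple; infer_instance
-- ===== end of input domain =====

-- B fuses A's two helpers into one accumulation pass per protein pair (no intermediate tuple list,
-- no second dict lookup); same return value, objective: alternative decomposition.

-- ===== PORT A =====
-- Python dict keyed by the pair (a, b): lookup = value of the first matching entry, none = key absent.
def pvDdiGet (d : List (String × String × List Int)) (a b : String) : Option (List Int) :=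
  (d.find? (fun p => p.1 == a && p.2.1 == b)).map (·.2.2)

def searchPFAMmatch (list_pfamId_orga_A : List String) (list_pfamId_orga_B : List String)
    (dict_ddi_sources : List (String × String × List Int)) : List (String × String) :=
  list_pfamId_orga_A.foldl (fun acc id_a =>
    list_pfamId_orga_B.foldl (fun acc2 id_b =>
      if (pvDdiGet dict_ddi_sources id_a id_b).isSome then acc2 ++ [(id_a, id_b)]
      else if (pvDdiGet dict_ddi_sources id_b id_a).isSome then acc2 ++ [(id_b, id_a)]
      else acc2) acc) []

def scoreDDICalculation (list_of_ddi_ids_tuples_pair : List (String × String))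
    (dict_ddi_scores : List (String × String × List Int)) : Int :=
  list_of_ddi_ids_tuples_pair.foldl (fun score_ppi tuple_ddi =>
    let list_sources := (pvDdiGet dict_ddi_scores tuple_ddi.1 tuple_ddi.2).getD []
    score_ppi + (if list_sources.contains 1 || list_sources.contains 2 then (9 : Int)
                 else (list_sources.length : Int))) 0

def calculatePPIscoresForCouple (dict_proteins_pfam_bact : List (String × List String)) (dict_proteins_pfam_phage : List (String × List String)) (dict_ddi_sources : List (String × String × List Int)) : List (Int × Int) :=
  (dict_proteins_pfam_bact.foldl (fun res kv_bact =>
    dict_proteins_pfam_phage.foldl (fun res kv_phage =>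
      let score_ppi := scoreDDICalculation (searchPFAMmatch kv_bact.2 kv_phage.2 dict_ddi_sources) dict_ddi_sources
      match res.get? score_ppi with
      | some c => res.insert score_ppi (c + 1)
      | none => res.insert score_ppi 1) res) (PySem.Dict.empty : PySem.Dict Int Int)).items

-- ===== PORT B =====
def pvSrcScore (sources : List Int) : Int :=
  if sources.contains 1 || sources.contains 2 then 9 else sources.length

def pvContrib (d : List (String × String × List Int)) (a b : String) : Int :=
  match pvDdiGet d a b with
  | some sources => pvSrcScore sources
  | none =>
    match pvDdiGet d b a with
    | some sources => pvSrcScore sources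
    | none => 0

def pvPairScore (d : List (String × String × List Int)) (vb vp : List String) : Int :=
  vb.foldl (fun s a => vp.foldl (fun s b => s + pvContrib d a b) s) 0

def calculatePPIscoresForCouple_alt (dict_proteins_pfam_bact : List (String × List String)) (dict_proteins_pfam_phage : List (String × List String)) (dict_ddi_sources : List (String × String × List Int)) : List (Int × Int) :=
  (dict_proteins_pfam_bact.foldl (fun hist kv_bact =>
    dict_proteins_pfam_phage.foldl (fun hist kv_phage =>
      let score := pvPairScore dict_ddi_sources kv_bact.2 kv_phage.2
      hist.insert score (hist.getD score 0 + 1)) hist) (PySem.Dict.empty : PySem.Dict Int Int)).items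

-- ===== PRECONDITION & SPEC =====
def Spec_calculatePPIscoresForCouple (dict_proteins_pfam_bact : List (String × List String)) (dict_proteins_pfam_phage : List (String × List String)) (dict_ddi_sources : List (String × String × List Int)) (out : List (Int × Int)) : Prop := out = calculatePPIscoresForCouple_alt dict_proteins_pfam_bact dict_proteins_pfam_phage dict_ddi_sources
instance (dict_proteins_pfam_bact : List (String × List String)) (dict_proteins_pfam_phage : List (String × List String)) (dict_ddi_sources : List (String × String × List Int)) (out : List (Int × Int)) : Decidable (Spec_calculatePPIscoresForCouple dict_proteins_pfam_bact dict_proteins_pfam_phage dict_ddi_sources out) := by unfold Spec_calculatePPIscoresForCouple; infer_instance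

-- ===== CLAIM (what is proved, stated in full; the proofs are below) =====
def Claim_equal_calculatePPIscoresForCouple : Prop := ∀ (dict_proteins_pfam_bact : List (String × List String)) (dict_proteins_pfam_phage : List (String × List String)) (dict_ddi_sources : List (String × String × List Int)), Dom_calculatePPIscoresForCouple dict_proteins_pfam_bact dict_proteins_pfam_phage dict_ddi_sources → Spec_calculatePPIscoresForCouple dict_proteins_pfam_bact dict_proteins_pfam_phage dict_ddi_sources (calculatePPIscoresForCouple dict_proteins_pfam_bact dict_proteins_pfam_phage dict_ddi_sources)

-- ===== LEMMAS AND PROOFS =====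

-- the one-match contribution list A's inner branch appends
def pvCell (d : List (String × String × List Int)) (a b : String) : List (String × String) :=
  if (pvDdiGet d a b).isSome then [(a, b)]
  else if (pvDdiGet d b a).isSome then [(b, a)]
  else []

lemma search_eq_flatMap (vb vp : List String) (d : List (String × String × List Int)) :
    searchPFAMmatch vb vp d = vb.flatMap (fun a => vp.flatMap (fun b => pvCell d a b)) := by
  unfold searchPFAMmatch
  have h : (fun (acc : List (String × String)) (id_a : String) =>
      vp.foldl (fun acc2 id_b =>
        if (pvDdiGet d id_a id_b).isSome then acc2 ++ [(id_a, id_b)]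
        else if (pvDdiGet d id_b id_a).isSome then acc2 ++ [(id_b, id_a)]
        else acc2) acc)
      = fun acc id_a => acc ++ vp.flatMap (fun b => pvCell d id_a b) := by
    funext acc id_a
    have hb : (fun (acc2 : List (String × String)) (id_b : String) =>
        if (pvDdiGet d id_a id_b).isSome then acc2 ++ [(id_a, id_b)]
        else if (pvDdiGet d id_b id_a).isSome then acc2 ++ [(id_b, id_a)]
        else acc2)
        = fun acc2 id_b => acc2 ++ pvCell d id_a id_b := by
      funext acc2 id_b
      unfold pvCell
      split_ifs <;> simp
    rw [hb, PySem.List.foldl_append_eq_flatMap]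
  rw [h, PySem.List.foldl_append_eq_flatMap]
  simp

lemma score_eq_sum (ts : List (String × String)) (d : List (String × String × List Int)) :
    scoreDDICalculation ts d
      = (ts.map (fun t => pvSrcScore ((pvDdiGet d t.1 t.2).getD []))).sum := by
  unfold scoreDDICalculation
  rw [show (fun (score_ppi : Int) (tuple_ddi : String × String) =>
      let list_sources := (pvDdiGet d tuple_ddi.1 tuple_ddi.2).getD []
      score_ppi + (if list_sources.contains 1 || list_sources.contains 2 then (9 : Int)
                   else (list_sources.length : Int)))
      = fun s t => s + pvSrcScore ((pvDdiGet d t.1 t.2).getD []) from rfl]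
  rw [PySem.List.foldl_add]
  simp

lemma cell_sum (d : List (String × String × List Int)) (a b : String) :
    ((pvCell d a b).map (fun t => pvSrcScore ((pvDdiGet d t.1 t.2).getD []))).sum
      = pvContrib d a b := by
  unfold pvCell pvContrib
  cases h1 : pvDdiGet d a b <;> cases h2 : pvDdiGet d b a <;> simp [h1, h2]

lemma pair_eq_sum (d : List (String × String × List Int)) (vb vp : List String) :
    pvPairScore d vb vp = (vb.map (fun a => (vp.map (fun b => pvContrib d a b)).sum)).sum := by
  unfold pvPairScore
  have h : (fun (s : Int) (a : String) => vp.foldl (fun s b => s + pvContrib d a b) s)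
      = fun s a => s + (vp.map (fun b => pvContrib d a b)).sum := by
    funext s a
    rw [PySem.List.foldl_add]
  rw [h, PySem.List.foldl_add]
  simp

lemma pv_sum_flatMap {α : Type} (l : List α) (f : α → List Int) :
    (l.flatMap f).sum = (l.map (fun a => (f a).sum)).sum := by
  simp [List.flatMap, Function.comp_def]

lemma cell_score_eq (d : List (String × String × List Int)) (vb vp : List String) :
    scoreDDICalculation (searchPFAMmatch vb vp d) d = pvPairScore d vb vp := by
  rw [search_eq_flatMap, score_eq_sum, pair_eq_sum]
  rw [List.map_flatMap, pv_sum_flatMap]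
  congr 1
  refine List.map_congr_left (fun a _ => ?_)
  rw [List.map_flatMap, pv_sum_flatMap]
  congr 1
  exact List.map_congr_left (fun b _ => cell_sum d a b)

lemma hist_update (res : PySem.Dict Int Int) (s : Int) :
    (match res.get? s with
     | some c => res.insert s (c + 1)
     | none => res.insert s 1)
      = res.insert s (res.getD s 0 + 1) := by
  cases h : res.get? s <;> simp [PySem.Dict.getD_eq_get?_getD, h]

-- ===== VERDICT (by name: the statement is the Claim_ definition above) =====
theorem calculatePPIscoresForCouple_spec : Claim_equal_calculatePPIscoresForCouple := by
  intro bact phage d _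
  show calculatePPIscoresForCouple bact phage d = calculatePPIscoresForCouple_alt bact phage d
  unfold calculatePPIscoresForCouple calculatePPIscoresForCouple_alt
  congr 1
  have h : (fun (res : PySem.Dict Int Int) (kv_bact : String × List String) =>
      phage.foldl (fun res kv_phage =>
        let score_ppi := scoreDDICalculation (searchPFAMmatch kv_bact.2 kv_phage.2 d) d
        match res.get? score_ppi with
        | some c => res.insert score_ppi (c + 1)
        | none => res.insert score_ppi 1) res)
      = fun res kv_bact =>
        phage.foldl (fun hist kv_phage =>
          let score := pvPairScore d kv_bact.2 kv_phage.2
          hist.insert score (hist.getD score 0 + 1)) res := by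
    funext res kv_bact
    have h2 : (fun (res : PySem.Dict Int Int) (kv_phage : String × List String) =>
        let score_ppi := scoreDDICalculation (searchPFAMmatch kv_bact.2 kv_phage.2 d) d
        match res.get? score_ppi with
        | some c => res.insert score_ppi (c + 1)
        | none => res.insert score_ppi 1)
        = fun hist kv_phage =>
          let score := pvPairScore d kv_bact.2 kv_phage.2
          hist.insert score (hist.getD score 0 + 1) := by
      funext res2 kv_phage
      show (match res2.get? (scoreDDICalculation (searchPFAMmatch kv_bact.2 kv_phage.2 d) d) with
          | some c => res2.insert (scoreDDICalculation (searchPFAMmatch kv_bact.2 kv_phage.2 d) d) (c + 1)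
          | none => res2.insert (scoreDDICalculation (searchPFAMmatch kv_bact.2 kv_phage.2 d) d) 1) = _
      rw [cell_score_eq]
      exact hist_update res2 (pvPairScore d kv_bact.2 kv_phage.2)
    rw [h2]
  rw [h]
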